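-- pv_equiv track=rewrite | github.com/sichan1301/js100 | programmers/level1/최소직사각형.py | solution
-- ===== SOURCE A (Python) =====
-- def solution(sizes):
--     width=[]
--     height=[]
--     for i in range(len(sizes)):
--         if sizes[i][0] >= sizes[i][1]:
--             width.append(sizes[i][0])
--             height.append(sizes[i][1])
--         else:
--             height.append(sizes[i][0])
--             width.append(sizes[i][1])
--     return max(width)*max(height)
-- ===== SOURCE B (Python) =====
-- def solution(sizes):
--     # Divide and conquer: rect(cards) returns (max long-side, max short-side)
--     # of a nonempty block of cards, combining the two halves' answers.
--     def rect(cards):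
--         if len(cards) <= 1:
--             c = cards[0]
--             a, b = c[0], c[1]
--             return (a, b) if a >= b else (b, a)
--         mid = len(cards) // 2
--         w1, h1 = rect(cards[:mid])
--         w2, h2 = rect(cards[mid:])
--         return (max(w1, w2), max(h1, h2))
--     w, h = rect(sizes)
--     return w * h
-- ===== Notes on version B (the rewrite author's own statement) =====
-- stated objective: alternative
-- what changed: Replaced A's index loop that builds two side lists and then runs two max() scans by a divide-and-conquer recursion: halve the card list, recursively compute each half's (max long-side, max short-side) pair, and merge the pairs; no intermediate lists, no separate scans, orientation handled only at the leaves.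
import Mathlib
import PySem

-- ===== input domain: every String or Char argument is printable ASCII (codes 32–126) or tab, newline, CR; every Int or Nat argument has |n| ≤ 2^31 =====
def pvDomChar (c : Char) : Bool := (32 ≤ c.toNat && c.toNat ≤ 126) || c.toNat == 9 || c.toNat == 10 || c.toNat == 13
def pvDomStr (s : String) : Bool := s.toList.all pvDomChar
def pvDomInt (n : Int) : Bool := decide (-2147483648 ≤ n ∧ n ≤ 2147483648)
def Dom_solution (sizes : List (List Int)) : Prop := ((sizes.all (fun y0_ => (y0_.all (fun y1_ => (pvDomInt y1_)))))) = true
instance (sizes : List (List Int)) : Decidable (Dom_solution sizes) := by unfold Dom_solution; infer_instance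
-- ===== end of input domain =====

-- B replaces A's build-two-lists-then-two-max()-scans by divide-and-conquer recursion merging (max long-side, max short-side) pairs of halves (alternative decomposition, not faster).


-- ===== PORT A =====
-- literal port: build width/height by appending per index, then max(width)*max(height).
-- pyGetD defaults and max?.getD 0 are exact on Pre_ (valid indices, nonempty lists).
def solution (sizes : List (List Int)) : Int :=
  let wh := (PySem.List.pyRange 0 (sizes.length : Int) 1).foldl
    (fun (acc : List Int × List Int) i =>
      let row := PySem.List.pyGetD sizes i []
      let a := PySem.List.pyGetD row 0 0
      let b := PySem.List.pyGetD row 1 0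
      if a ≥ b then (acc.1 ++ [a], acc.2 ++ [b])
      else (acc.1 ++ [b], acc.2 ++ [a]))
    ([], [])
  ((PySem.List.max? wh.1 (fun x => x)).getD 0) * ((PySem.List.max? wh.2 (fun x => x)).getD 0)

-- ===== PORT B =====
-- literal port of Source B's rect: halve, recurse, merge pairwise maxima.
-- The len(cards) ≤ 1 base reads cards[0]: on empty cards Python raises IndexError
-- (outside Pre_); the port's pyGetD defaults make it total there (unreachable under Pre_).
def rectB (cards : List (List Int)) : Int × Int :=
  if h : cards.length ≤ 1 then
    let c := PySem.List.pyGetD cards 0 []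
    let a := PySem.List.pyGetD c 0 0
    let b := PySem.List.pyGetD c 1 0
    if a ≥ b then (a, b) else (b, a)
  else
    let mid := cards.length / 2
    -- cards[:mid] and cards[mid:] via PySem slices
    let p1 := rectB (PySem.List.slice cards none (some (mid : Int)))
    let p2 := rectB (PySem.List.slice cards (some (mid : Int)) none)
    (max p1.1 p2.1, max p1.2 p2.2)
termination_by cards.length
decreasing_by
  · simp only [PySem.List.slice_to_natCast, List.length_take]; omega
  · simp only [PySem.List.slice_from_natCast, List.length_drop]; omega

def solution_alt (sizes : List (List Int)) : Int :=
  let p := rectB sizes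
  p.1 * p.2

-- ===== PRECONDITION & SPEC =====
-- Pre_ excludes exactly the inputs on which A raises: empty sizes (max([]) → ValueError)
-- and any card with fewer than two entries (IndexError).
def Pre_solution (sizes : List (List Int)) : Prop :=
  sizes ≠ [] ∧ ∀ row ∈ sizes, 2 ≤ row.length
instance (sizes : List (List Int)) : Decidable (Pre_solution sizes) := by
  unfold Pre_solution; infer_instance
def pvWitness_solution : List (List Int) := [[3, 1], [2, 5]]

def Spec_solution (sizes : List (List Int)) (out : Int) : Prop := out = solution_alt sizes
instance (sizes : List (List Int)) (out : Int) : Decidable (Spec_solution sizes out) := by unfold Spec_solution; infer_instance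

-- ===== CLAIM (what is proved, stated in full; the proofs are below) =====
def Claim_equal_solution : Prop := ∀ (sizes : List (List Int)), Dom_solution sizes → Pre_solution sizes → Spec_solution sizes (solution sizes)

-- ===== LEMMAS AND PROOFS =====

-- A's loop body, with the row already fetched
def aStep (acc : List Int × List Int) (row : List Int) : List Int × List Int :=
  let a := PySem.List.pyGetD row 0 0
  let b := PySem.List.pyGetD row 1 0
  if a ≥ b then (acc.1 ++ [a], acc.2 ++ [b]) else (acc.1 ++ [b], acc.2 ++ [a])

def fmax (row : List Int) : Int := max (PySem.List.pyGetD row 0 0) (PySem.List.pyGetD row 1 0)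
def fmin (row : List Int) : Int := min (PySem.List.pyGetD row 0 0) (PySem.List.pyGetD row 1 0)

-- maximum of a nonempty list, the way max?.getD 0 computes it
def M (l : List Int) : Int :=
  match l with
  | [] => 0
  | x :: t => t.foldl max x

lemma aStep_eq (acc : List Int × List Int) (row : List Int) :
    aStep acc row = (acc.1 ++ [fmax row], acc.2 ++ [fmin row]) := by
  unfold aStep fmax fmin
  dsimp only
  split_ifs with h
  · simp [max_eq_left h, min_eq_right h]
  · have h' : PySem.List.pyGetD row 0 0 ≤ PySem.List.pyGetD row 1 0 := le_of_not_ge h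
    simp [max_eq_right h', min_eq_left h']

lemma foldl_aStep (l : List (List Int)) (acc : List Int × List Int) :
    l.foldl aStep acc = (acc.1 ++ l.map fmax, acc.2 ++ l.map fmin) := by
  induction l generalizing acc with
  | nil => simp
  | cons x t ih => simp [List.foldl_cons, aStep_eq, ih]

lemma foldl_max_shift (b : Int) (t : List Int) :
    ∀ c : Int, t.foldl max (max b c) = max b (t.foldl max c) := by
  induction t with
  | nil => intro c; rfl
  | cons y t ih =>
    intro c
    simp only [List.foldl_cons, max_assoc, ih]

lemma M_append (l1 l2 : List Int) (h1 : l1 ≠ []) (h2 : l2 ≠ []) :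
    M (l1 ++ l2) = max (M l1) (M l2) := by
  obtain ⟨x, t1, rfl⟩ := List.exists_cons_of_ne_nil h1
  obtain ⟨y, t2, rfl⟩ := List.exists_cons_of_ne_nil h2
  show (t1 ++ y :: t2).foldl max x = _
  rw [List.foldl_append]
  show (t2).foldl max (max ((t1).foldl max x) y) = _
  rw [foldl_max_shift]
  rfl

lemma rectB_eq_aux : ∀ (n : Nat) (l : List (List Int)), l.length ≤ n → l ≠ [] →
    rectB l = (M (l.map fmax), M (l.map fmin)) := by
  intro n
  induction n with
  | zero =>
    intro l hlen hne
    cases l with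
    | nil => exact absurd rfl hne
    | cons _ _ => simp at hlen
  | succ n ih =>
    intro l hlen hne
    by_cases hle : l.length ≤ 1
    · obtain ⟨c, t, rfl⟩ := List.exists_cons_of_ne_nil hne
      have ht : t = [] := by
        cases t with
        | nil => rfl
        | cons _ _ => simp at hle
      subst ht
      rw [rectB]
      simp only [List.length_cons, List.length_nil, le_refl, dite_true,
        PySem.List.pyGetD_zero_cons, List.map_cons, List.map_nil]
      show _ = (fmax c, fmin c)
      unfold fmax fmin
      split_ifs with hab
      · simp [max_eq_left hab, min_eq_right hab]
      · have h' : PySem.List.pyGetD c 0 0 ≤ PySem.List.pyGetD c 1 0 := le_of_not_ge hab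
        simp [max_eq_right h', min_eq_left h']
    · have hlen2 : 2 ≤ l.length := by omega
      have hmid1 : 1 ≤ l.length / 2 := by omega
      have hmid2 : l.length / 2 < l.length := by omega
      rw [rectB]
      rw [dif_neg hle]
      simp only [PySem.List.slice_to_natCast, PySem.List.slice_from_natCast]
      have hlt : (l.take (l.length / 2)).length = l.length / 2 := by
        rw [List.length_take]; omega
      have hld : (l.drop (l.length / 2)).length = l.length - l.length / 2 :=
        List.length_drop ..
      have htne : l.take (l.length / 2) ≠ [] := by
        intro hnil; rw [hnil] at hlt; simp at hlt; omega
      have hdne : l.drop (l.length / 2) ≠ [] := by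
        intro hnil; rw [hnil] at hld; simp at hld; omega
      rw [ih (l.take (l.length / 2)) (by rw [hlt]; omega) htne,
        ih (l.drop (l.length / 2)) (by rw [hld]; omega) hdne]
      simp only [List.map_take, List.map_drop]
      rw [← M_append ((l.map fmax).take (l.length / 2)) ((l.map fmax).drop (l.length / 2))
          (by simpa using htne) (by simpa using hdne),
        ← M_append ((l.map fmin).take (l.length / 2)) ((l.map fmin).drop (l.length / 2))
          (by simpa using htne) (by simpa using hdne)]
      simp

lemma rectB_eq (l : List (List Int)) (h : l ≠ []) :
    rectB l = (M (l.map fmax), M (l.map fmin)) :=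
  rectB_eq_aux l.length l le_rfl h

-- ===== VERDICT (by name: the statement is the Claim_ definition above) =====
theorem solution_spec : Claim_equal_solution := by
  intro sizes _ hpre
  obtain ⟨hne, _⟩ := hpre
  unfold Spec_solution solution solution_alt
  rw [show (fun (acc : List Int × List Int) (i : Int) =>
        let row := PySem.List.pyGetD sizes i []
        let a := PySem.List.pyGetD row 0 0
        let b := PySem.List.pyGetD row 1 0
        if a ≥ b then (acc.1 ++ [a], acc.2 ++ [b]) else (acc.1 ++ [b], acc.2 ++ [a]))
      = (fun acc i => aStep acc (PySem.List.pyGetD sizes i [])) from rfl]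
  rw [PySem.List.foldl_pyRange_zero_pyGetD' sizes [] aStep ([], [])]
  rw [foldl_aStep, rectB_eq sizes hne]
  obtain ⟨x, t, rfl⟩ := List.exists_cons_of_ne_nil hne
  simp [PySem.List.max?_id_cons, M, fmax, fmin]
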